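-- pv_equiv track=rewrite | github.com/dlsvob/rlm-fractal | fractal/parser/pdf_parser.py | _extract_parenthesised_string
-- ===== SOURCE A (Python) =====
-- def _extract_parenthesised_string(text: str, start: int) -> tuple[str, int]:
--     """
--     Extract a balanced parenthesised string from text starting at `start`.
--
--     Returns (inner_content, end_position).
--
--     HARDENED: the original used assert to verify text[start] == '('.
--     Now returns empty string if precondition fails instead of crashing.
--     """
--     if start >= len(text) or text[start] != '(':
--         return '', start + 1
--     depth = 0
--     i = start
--     while i < len(text):
--         ch = text[i]
--         if ch == '\\':
--             i += 2
--             continue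
--         if ch == '(':
--             depth += 1
--         elif ch == ')':
--             depth -= 1
--             if depth == 0:
--                 return text[start + 1:i], i + 1
--         i += 1
--     return text[start + 1:], len(text)
-- ===== SOURCE B (Python) =====
-- def _find_close(text, i):
--     """Return the index of the ')' closing the group whose content starts at i,
--     or None if the text ends first. Recurses on each nested '(' group."""
--     n = len(text)
--     while i < n:
--         ch = text[i]
--         if ch == '\\':
--             i += 2
--         elif ch == '(':
--             j = _find_close(text, i + 1)
--             if j is None:
--                 return None
--             i = j + 1
--         elif ch == ')':
--             return i
--         else:
--             i += 1
--     return None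
--
--
-- def _extract_parenthesised_string(text: str, start: int) -> tuple[str, int]:
--     if start >= len(text) or text[start] != '(':
--         return '', start + 1
--     close = _find_close(text, start + 1)
--     if close is None:
--         return text[start + 1:], len(text)
--     return text[start + 1:close], close + 1
-- ===== Notes on version B (the rewrite author's own statement) =====
-- stated objective: alternative
-- what changed: The flat while loop with an integer depth counter is replaced by a recursive-descent helper that scans for the closing ')' and recurses to consume each nested '(' group, so no depth variable exists.
import Mathlib
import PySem

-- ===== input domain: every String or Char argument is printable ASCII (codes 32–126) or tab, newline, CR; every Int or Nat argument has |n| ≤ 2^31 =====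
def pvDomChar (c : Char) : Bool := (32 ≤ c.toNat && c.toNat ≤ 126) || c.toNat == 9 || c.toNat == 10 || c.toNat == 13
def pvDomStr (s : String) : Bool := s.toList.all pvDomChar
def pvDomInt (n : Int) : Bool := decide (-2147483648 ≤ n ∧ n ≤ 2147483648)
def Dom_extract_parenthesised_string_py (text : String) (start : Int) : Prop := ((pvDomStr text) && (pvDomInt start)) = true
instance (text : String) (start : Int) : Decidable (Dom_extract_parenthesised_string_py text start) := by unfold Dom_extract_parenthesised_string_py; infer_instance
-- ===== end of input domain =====

-- B replaces A's flat depth-counter while loop by a recursive-descent helper (recursion on each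
-- nested '(' group); same return value everywhere A returns, no argument is mutated.

-- ===== PORT A =====
-- ch = text[i] (Python negative-index semantics; the default is never reached on admitted runs)
def pvCh (cs : List Char) (i : Int) : Char := (PySem.List.pyGet? cs i).getD ' '

-- A's while loop; the Nat fuel is only a totality guard (2*len+2 steps always suffice under Pre_)
def pvLoopA (cs : List Char) (start : Int) : Nat → Int → Int → String × Int
  | 0, _, _ => (String.ofList (PySem.List.slice cs (some (start+1)) (some (cs.length : Int))), (cs.length : Int))
  | fuel+1, i, depth =>
    if i < (cs.length : Int) then
      if pvCh cs i = '\\' then pvLoopA cs start fuel (i+2) depth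
      else if pvCh cs i = '(' then pvLoopA cs start fuel (i+1) (depth+1)
      else if pvCh cs i = ')' then
        if depth - 1 = 0 then
          (String.ofList (PySem.List.slice cs (some (start+1)) (some i)), i+1)
        else pvLoopA cs start fuel (i+1) (depth-1)
      else pvLoopA cs start fuel (i+1) depth
    else (String.ofList (PySem.List.slice cs (some (start+1)) (some (cs.length : Int))), (cs.length : Int))

def extract_parenthesised_string_py (text : String) (start : Int) : String × Int :=
  let cs := text.toList
  if (cs.length : Int) ≤ start ∨ pvCh cs start ≠ '(' then ("", start + 1)
  else pvLoopA cs start (2 * cs.length + 2) start 0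

-- ===== PORT B =====
-- B's _find_close: index of the ')' closing the group whose content starts at i, none if the text
-- ends first; recurses on each nested '(' group. The Nat fuel is only a totality guard.
def pvFind (cs : List Char) : Nat → Int → Option Int
  | 0, _ => none
  | fuel+1, i =>
    if i < (cs.length : Int) then
      if pvCh cs i = '\\' then pvFind cs fuel (i+2)
      else if pvCh cs i = '(' then
        match pvFind cs fuel (i+1) with
        | none => none
        | some j => pvFind cs fuel (j+1)
      else if pvCh cs i = ')' then some i
      else pvFind cs fuel (i+1)
    else none

def extract_parenthesised_string_py_alt (text : String) (start : Int) : String × Int :=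
  let cs := text.toList
  if (cs.length : Int) ≤ start ∨ pvCh cs start ≠ '(' then ("", start + 1)
  else
    match pvFind cs (2 * cs.length + 2) (start + 1) with
    | some close => (String.ofList (PySem.List.slice cs (some (start+1)) (some close)), close + 1)
    | none => (String.ofList (PySem.List.slice cs (some (start+1)) (some (cs.length : Int))), (cs.length : Int))

-- ===== PRECONDITION & SPEC =====
-- A raises IndexError exactly when start < -len(text) (text[start] out of range); Pre_ excludes
-- exactly those inputs and nothing else.
def Pre_extract_parenthesised_string_py (text : String) (start : Int) : Prop :=
  -(text.toList.length : Int) ≤ start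
instance (text : String) (start : Int) : Decidable (Pre_extract_parenthesised_string_py text start) := by unfold Pre_extract_parenthesised_string_py; infer_instance

def pvWitness_extract_parenthesised_string_py : String × Int := ("(a)", 0)

def Spec_extract_parenthesised_string_py (text : String) (start : Int) (out : String × Int) : Prop := out = extract_parenthesised_string_py_alt text start
instance (text : String) (start : Int) (out : String × Int) : Decidable (Spec_extract_parenthesised_string_py text start out) := by unfold Spec_extract_parenthesised_string_py; infer_instance

-- ===== CLAIM (what is proved, stated in full; the proofs are below) =====
def Claim_equal_extract_parenthesised_string_py : Prop := ∀ (text : String) (start : Int), Dom_extract_parenthesised_string_py text start → Pre_extract_parenthesised_string_py text start → Spec_extract_parenthesised_string_py text start (extract_parenthesised_string_py text start)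

-- ===== LEMMAS AND PROOFS =====

-- one-step unfolding equations (rfl), so that rewriting never unfolds the fixed fuel literal
lemma pvLoopA_step (cs : List Char) (start : Int) (f : Nat) (i depth : Int) :
    pvLoopA cs start (f+1) i depth =
      if i < (cs.length : Int) then
        if pvCh cs i = '\\' then pvLoopA cs start f (i+2) depth
        else if pvCh cs i = '(' then pvLoopA cs start f (i+1) (depth+1)
        else if pvCh cs i = ')' then
          if depth - 1 = 0 then
            (String.ofList (PySem.List.slice cs (some (start+1)) (some i)), i+1)
          else pvLoopA cs start f (i+1) (depth-1)
        else pvLoopA cs start f (i+1) depth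
      else (String.ofList (PySem.List.slice cs (some (start+1)) (some (cs.length : Int))), (cs.length : Int)) := rfl

lemma pvFind_step (cs : List Char) (f : Nat) (i : Int) :
    pvFind cs (f+1) i =
      if i < (cs.length : Int) then
        if pvCh cs i = '\\' then pvFind cs f (i+2)
        else if pvCh cs i = '(' then
          match pvFind cs f (i+1) with
          | none => none
          | some j => pvFind cs f (j+1)
        else if pvCh cs i = ')' then some i
        else pvFind cs f (i+1)
      else none := rfl

lemma pvFind_le (cs : List Char) : ∀ (fuel : Nat) (i j : Int),
    pvFind cs fuel i = some j → i ≤ j ∧ j < (cs.length : Int) := by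
  intro fuel
  induction fuel with
  | zero => intro i j h; simp [pvFind] at h
  | succ f ih =>
    intro i j h
    rw [pvFind_step] at h
    split_ifs at h with h1 h2 h3 h4
    · have := ih _ _ h; exact ⟨by omega, this.2⟩
    · cases hj : pvFind cs f (i+1) with
      | none => rw [hj] at h; cases h
      | some j1 =>
        rw [hj] at h
        have hb1 := ih _ _ hj
        have hb2 := ih _ _ h
        exact ⟨by omega, hb2.2⟩
    · cases h; exact ⟨le_refl _, h1⟩
    · have := ih _ _ h; exact ⟨by omega, this.2⟩

lemma pvFind_mono (cs : List Char) : ∀ (f g : Nat) (i : Int),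
    ((cs.length : Int) - i).toNat < f → ((cs.length : Int) - i).toNat < g →
    pvFind cs f i = pvFind cs g i := by
  intro f
  induction f with
  | zero => intro g i hf _; exact absurd hf (Nat.not_lt_zero _)
  | succ f ih =>
    intro g i hf hg
    cases g with
    | zero => exact absurd hg (Nat.not_lt_zero _)
    | succ g =>
      rw [pvFind_step, pvFind_step]
      by_cases h1 : i < (cs.length : Int)
      · rw [if_pos h1, if_pos h1]
        by_cases h2 : pvCh cs i = '\\'
        · rw [if_pos h2, if_pos h2]; exact ih g (i+2) (by omega) (by omega)
        · rw [if_neg h2, if_neg h2]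
          by_cases h3 : pvCh cs i = '('
          · rw [if_pos h3, if_pos h3]
            have hrec : pvFind cs f (i+1) = pvFind cs g (i+1) := ih g (i+1) (by omega) (by omega)
            rw [← hrec]
            cases hj : pvFind cs f (i+1) with
            | none => rfl
            | some j =>
              have hb := pvFind_le cs f (i+1) j hj
              exact ih g (j+1) (by omega) (by omega)
          · rw [if_neg h3, if_neg h3]
            by_cases h4 : pvCh cs i = ')'
            · rw [if_pos h4, if_pos h4]
            · rw [if_neg h4, if_neg h4]; exact ih g (i+1) (by omega) (by omega)
      · rw [if_neg h1, if_neg h1]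

lemma pvLoopA_mono (cs : List Char) (start : Int) : ∀ (f g : Nat) (i d : Int),
    ((cs.length : Int) - i).toNat < f → ((cs.length : Int) - i).toNat < g →
    pvLoopA cs start f i d = pvLoopA cs start g i d := by
  intro f
  induction f with
  | zero => intro g i d hf _; exact absurd hf (Nat.not_lt_zero _)
  | succ f ih =>
    intro g i d hf hg
    cases g with
    | zero => exact absurd hg (Nat.not_lt_zero _)
    | succ g =>
      rw [pvLoopA_step, pvLoopA_step]
      by_cases h1 : i < (cs.length : Int)
      · rw [if_pos h1, if_pos h1]
        by_cases h2 : pvCh cs i = '\\'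
        · rw [if_pos h2, if_pos h2]; exact ih g (i+2) d (by omega) (by omega)
        · rw [if_neg h2, if_neg h2]
          by_cases h3 : pvCh cs i = '('
          · rw [if_pos h3, if_pos h3]; exact ih g (i+1) (d+1) (by omega) (by omega)
          · rw [if_neg h3, if_neg h3]
            by_cases h4 : pvCh cs i = ')'
            · rw [if_pos h4, if_pos h4]
              by_cases h5 : d - 1 = 0
              · rw [if_pos h5, if_pos h5]
              · rw [if_neg h5, if_neg h5]; exact ih g (i+1) (d-1) (by omega) (by omega)
            · rw [if_neg h4, if_neg h4]; exact ih g (i+1) d (by omega) (by omega)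
      · rw [if_neg h1, if_neg h1]

-- A's loop at depth d ≥ 1 behaves like B's recursive close-finder.
lemma pvBridge (cs : List Char) (start : Int) : ∀ (f : Nat) (i d : Int),
    -(cs.length : Int) ≤ i → ((cs.length : Int) - i).toNat < f → 1 ≤ d →
    pvLoopA cs start f i d =
      (match pvFind cs f i with
       | some j =>
         if d = 1 then (String.ofList (PySem.List.slice cs (some (start+1)) (some j)), j+1)
         else pvLoopA cs start (2 * cs.length + 2) (j+1) (d-1)
       | none => (String.ofList (PySem.List.slice cs (some (start+1)) (some (cs.length : Int))), (cs.length : Int))) := by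
  intro f
  induction f with
  | zero => intro i d _ hf _; exact absurd hf (Nat.not_lt_zero _)
  | succ f ih =>
    intro i d hlo hf hd
    rw [pvLoopA_step, pvFind_step]
    by_cases h1 : i < (cs.length : Int)
    · rw [if_pos h1, if_pos h1]
      by_cases h2 : pvCh cs i = '\\'
      · rw [if_pos h2, if_pos h2]
        exact ih (i+2) d (by omega) (by omega) hd
      · rw [if_neg h2, if_neg h2]
        by_cases h3 : pvCh cs i = '('
        · rw [if_pos h3, if_pos h3]
          rw [ih (i+1) (d+1) (by omega) (by omega) (by omega)]
          cases hj : pvFind cs f (i+1) with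
          | none => rfl
          | some j =>
            have hb := pvFind_le cs f (i+1) j hj
            dsimp only
            rw [if_neg (by omega : ¬ (d + 1 = 1)), (by omega : d + 1 - 1 = d)]
            rw [pvLoopA_mono cs start (2 * cs.length + 2) f (j+1) d (by omega) (by omega)]
            exact ih (j+1) d (by omega) (by omega) hd
        · rw [if_neg h3, if_neg h3]
          by_cases h4 : pvCh cs i = ')'
          · rw [if_pos h4, if_pos h4]
            dsimp only
            by_cases h5 : d = 1
            · rw [if_pos (by omega : d - 1 = 0), if_pos h5]
            · rw [if_neg (by omega : ¬ d - 1 = 0), if_neg h5]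
              exact pvLoopA_mono cs start f (2 * cs.length + 2) (i+1) (d-1) (by omega) (by omega)
          · rw [if_neg h4, if_neg h4]
            exact ih (i+1) d (by omega) (by omega) hd
    · rw [if_neg h1, if_neg h1]

-- ===== VERDICT (by name: the statement is the Claim_ definition above) =====
theorem extract_parenthesised_string_py_spec : Claim_equal_extract_parenthesised_string_py := by
  intro text start _ hpre
  unfold Spec_extract_parenthesised_string_py
  unfold Pre_extract_parenthesised_string_py at hpre
  unfold extract_parenthesised_string_py extract_parenthesised_string_py_alt
  set cs := text.toList with hcs
  by_cases hg : (cs.length : Int) ≤ start ∨ pvCh cs start ≠ '('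
  · simp only [if_pos hg]
  · simp only [if_neg hg]
    obtain ⟨h1', h2'⟩ := not_or.mp hg
    have h1 : start < (cs.length : Int) := by omega
    have h2 : pvCh cs start = '(' := not_not.mp h2'
    rw [(rfl : 2 * cs.length + 2 = (2 * cs.length + 1) + 1), pvLoopA_step, if_pos h1,
        if_neg (by rw [h2]; decide), if_pos h2]
    rw [pvBridge cs start (2 * cs.length + 1) (start+1) (0+1) (by omega) (by omega) (by omega)]
    rw [pvFind_mono cs (2 * cs.length + 1) (2 * cs.length + 2) (start+1) (by omega) (by omega)]
    cases hj : pvFind cs (2 * cs.length + 2) (start+1) with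
    | none => rfl
    | some j => dsimp only; rw [if_pos (by omega : (0:Int)+1 = 1)]
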